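-- pv_equiv track=rewrite | github.com/duilec/CS61A-spring2022 | exercise/mt2_review.py | largest_adj_sum
-- ===== SOURCE A (Python) =====
-- def largest_adj_sum(s):
--     """Largest sum of two adjacent elements in a list s.
--
--     >>> largest_adj_sum([-4, -3, -2, 3, 2, 4])
--     6
--     >>> largest_adj_sum([-4, 3, -2, -3, 2, -4])
--     1
--     """
--     two_adjacent_sum_list = []
--     # construct the list of two adjacent sum
--     for i in range(len(s)):
--         if i + 1 < len(s): # note: we can't out of len(s)
--             two_adjacent_sum_list += [s[i] + s[i+1]]
--     # find the largest sum in the list of two adjacent sum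
--     largest_sum = two_adjacent_sum_list[0]
--     for val in two_adjacent_sum_list:
--         if val > largest_sum:
--             largest_sum = val
--     return largest_sum
-- ===== SOURCE B (Python) =====
-- def largest_adj_sum(s):
--     best = s[0] + s[1]
--     for i in range(1, len(s) - 1):
--         best = max(best, s[i] + s[i + 1])
--     return best
-- ===== Notes on version B (the rewrite author's own statement) =====
-- stated objective: simpler
-- what changed: Replaces the build-a-list-of-adjacent-sums pass followed by a hand-rolled maximum scan with a single pass that keeps only a running maximum (no intermediate list).
import Mathlib
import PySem

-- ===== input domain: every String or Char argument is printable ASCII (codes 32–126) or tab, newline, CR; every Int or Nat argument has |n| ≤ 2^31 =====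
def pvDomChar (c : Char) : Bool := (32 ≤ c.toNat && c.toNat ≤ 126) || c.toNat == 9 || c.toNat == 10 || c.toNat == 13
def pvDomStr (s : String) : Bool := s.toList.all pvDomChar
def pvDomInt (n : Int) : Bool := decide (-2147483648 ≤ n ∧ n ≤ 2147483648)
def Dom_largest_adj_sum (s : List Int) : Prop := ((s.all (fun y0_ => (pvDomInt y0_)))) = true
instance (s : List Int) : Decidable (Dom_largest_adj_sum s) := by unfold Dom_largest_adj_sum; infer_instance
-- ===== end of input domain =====

-- B replaces A's two passes (build the list of adjacent sums, then scan it for the max) with a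
-- single running-maximum pass; objective: simpler. Pre_ excludes lists of length < 2, on which
-- the Python A raises IndexError.


-- ===== PORT A =====
-- Literal port: build the list of adjacent sums, then scan it for the largest.
-- Under Pre_ (length ≥ 2) every index access is in range, so pyGetD's default is never used.
def largest_adj_sum (s : List Int) : Int :=
  let lst := (PySem.List.pyRange 0 (s.length : Int) 1).foldl
    (fun acc i =>
      if i + 1 < (s.length : Int) then
        acc ++ [PySem.List.pyGetD s i 0 + PySem.List.pyGetD s (i + 1) 0]
      else acc) []
  lst.foldl (fun m v => if v > m then v else m) (PySem.List.pyGetD lst 0 0)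

-- ===== PORT B =====
-- Literal port of Source B: one pass maintaining a running maximum.
def largest_adj_sum_alt (s : List Int) : Int :=
  (PySem.List.pyRange 1 ((s.length : Int) - 1) 1).foldl
    (fun best i => max best (PySem.List.pyGetD s i 0 + PySem.List.pyGetD s (i + 1) 0))
    (PySem.List.pyGetD s 0 0 + PySem.List.pyGetD s 1 0)

-- ===== PRECONDITION & SPEC =====
-- Pre_ excludes exactly the inputs (length < 2) on which the Python A raises IndexError.
def Pre_largest_adj_sum (s : List Int) : Prop := 2 ≤ s.length
instance (s : List Int) : Decidable (Pre_largest_adj_sum s) := by unfold Pre_largest_adj_sum; infer_instance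
def pvWitness_largest_adj_sum : List Int := [-4, -3, -2, 3, 2, 4]
def Spec_largest_adj_sum (s : List Int) (out : Int) : Prop := out = largest_adj_sum_alt s
instance (s : List Int) (out : Int) : Decidable (Spec_largest_adj_sum s out) := by unfold Spec_largest_adj_sum; infer_instance

-- ===== CLAIM (what is proved, stated in full; the proofs are below) =====
def Claim_equal_largest_adj_sum : Prop := ∀ (s : List Int), Dom_largest_adj_sum s → Pre_largest_adj_sum s → Spec_largest_adj_sum s (largest_adj_sum s)

-- ===== LEMMAS AND PROOFS =====

-- the adjacent-sum at index i
def adjSum (s : List Int) (i : Int) : Int :=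
  PySem.List.pyGetD s i 0 + PySem.List.pyGetD s (i + 1) 0

-- A's "if v > m" update is just max
theorem ite_gt_eq_max (m v : Int) : (if v > m then v else m) = max m v := by
  split_ifs with h <;> omega

-- A's first loop builds the mapped adjacent-sum list over range(0, len-1)
theorem buildA_eq_map (s : List Int) (h : 2 ≤ s.length) :
    (PySem.List.pyRange 0 (s.length : Int) 1).foldl
      (fun acc i =>
        if i + 1 < (s.length : Int) then
          acc ++ [PySem.List.pyGetD s i 0 + PySem.List.pyGetD s (i + 1) 0]
        else acc) []
    = (PySem.List.pyRange 0 ((s.length : Int) - 1) 1).map (adjSum s) := by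
  have hsplit : PySem.List.pyRange 0 (s.length : Int) 1
      = PySem.List.pyRange 0 ((s.length : Int) - 1) 1 ++ [(s.length : Int) - 1] := by
    have := PySem.List.pyRange_one_succ_right (a := 0) (b := (s.length : Int) - 1) (by omega)
    simpa [sub_add_cancel] using this
  rw [hsplit, List.foldl_append]
  have hmap :
      (PySem.List.pyRange 0 ((s.length : Int) - 1) 1).foldl
        (fun acc i =>
          if i + 1 < (s.length : Int) then
            acc ++ [PySem.List.pyGetD s i 0 + PySem.List.pyGetD s (i + 1) 0]
          else acc) []
      = (PySem.List.pyRange 0 ((s.length : Int) - 1) 1).map (adjSum s) := by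
    rw [PySem.List.foldl_congr_mem
      (g := fun acc i => acc ++ [adjSum s i])
      (h := by
        intro acc i hi
        have := (PySem.List.mem_pyRange_one).1 hi
        have hlt : i + 1 < (s.length : Int) := by omega
        simp [hlt, adjSum])]
    simpa using PySem.List.foldl_append_singleton_eq_map (f := adjSum s)
      (l := PySem.List.pyRange 0 ((s.length : Int) - 1) 1) (acc := [])
  rw [hmap]
  simp

theorem largest_adj_sum_eq_alt (s : List Int) (h : Pre_largest_adj_sum s) :
    largest_adj_sum s = largest_adj_sum_alt s := by
  have h2 : 2 ≤ s.length := h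
  unfold largest_adj_sum largest_adj_sum_alt
  rw [buildA_eq_map s h2]
  have hcons : PySem.List.pyRange 0 ((s.length : Int) - 1) 1
      = 0 :: PySem.List.pyRange 1 ((s.length : Int) - 1) 1 := by
    simpa using PySem.List.pyRange_one_cons (a := 0) (b := (s.length : Int) - 1) (by omega)
  rw [hcons]
  simp only [List.map_cons, List.foldl_cons]
  have hhead : PySem.List.pyGetD (adjSum s 0 :: (PySem.List.pyRange 1 ((s.length : Int) - 1) 1).map (adjSum s)) 0 0
      = adjSum s 0 := PySem.List.pyGetD_zero_cons _ _ _
  rw [hhead, ite_gt_eq_max, max_self, List.foldl_map]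
  have hadj0 : adjSum s 0 = PySem.List.pyGetD s 0 0 + PySem.List.pyGetD s 1 0 := rfl
  have hf : (fun (x : Int) (y : Int) => if adjSum s y > x then adjSum s y else x)
      = fun best i => max best (PySem.List.pyGetD s i 0 + PySem.List.pyGetD s (i + 1) 0) := by
    funext x y; exact ite_gt_eq_max x (adjSum s y)
  rw [hf, hadj0]

-- ===== VERDICT (by name: the statement is the Claim_ definition above) =====
theorem largest_adj_sum_spec : Claim_equal_largest_adj_sum := by
  intro s _ hpre
  exact largest_adj_sum_eq_alt s hpre
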